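-- pv_equiv track=rewrite | github.com/justmebob123/autonomy | pipeline/adaptive_orchestrator.py | _assess_error_severity
-- ===== SOURCE A (Python) =====
-- from typing import Dict, List, Any, Optional, Tuple, Set
--
-- def _assess_error_severity(errors: List[Dict[str, Any]]) -> str:
--     """Assess overall error severity."""
--     if not errors:
--         return 'none'
--
--     severities = [e.get('severity', 'medium') for e in errors]
--
--     if 'critical' in severities:
--         return 'critical'
--     elif 'high' in severities:
--         return 'high'
--     elif 'medium' in severities:
--         return 'medium'
--     else:
--         return 'low'
-- ===== SOURCE B (Python) =====
-- def _assess_error_severity(errors):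
--     """Assess overall error severity."""
--     if not errors:
--         return 'none'
--     rank_map = {'critical': 3, 'high': 2, 'medium': 1}
--     rank = 0
--     for e in errors:
--         rank = max(rank, rank_map.get(e.get('severity', 'medium'), 0))
--     return {3: 'critical', 2: 'high', 1: 'medium'}.get(rank, 'low')
-- ===== Notes on version B (the rewrite author's own statement) =====
-- stated objective: simpler
-- what changed: Replaces the intermediate severities list and the three sequential membership scans with a single fold that keeps a numeric max severity rank, translated back to a name at the end.
import Mathlib
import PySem

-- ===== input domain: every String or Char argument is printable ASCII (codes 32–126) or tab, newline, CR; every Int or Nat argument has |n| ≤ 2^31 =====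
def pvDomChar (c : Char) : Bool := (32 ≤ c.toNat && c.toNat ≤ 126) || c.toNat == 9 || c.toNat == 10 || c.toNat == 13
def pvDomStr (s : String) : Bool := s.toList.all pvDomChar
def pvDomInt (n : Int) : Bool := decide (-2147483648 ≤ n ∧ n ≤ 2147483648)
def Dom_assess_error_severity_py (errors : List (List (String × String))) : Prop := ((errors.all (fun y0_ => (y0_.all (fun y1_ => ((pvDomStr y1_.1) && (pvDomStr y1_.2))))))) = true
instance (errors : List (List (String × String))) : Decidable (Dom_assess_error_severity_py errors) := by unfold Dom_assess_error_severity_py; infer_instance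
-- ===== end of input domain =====

-- ===== PORT A =====
-- B changes A's list-build + three membership scans into one max-rank fold; same return values.
def assess_error_severity_py (errors : List (List (String × String))) : String :=
  if errors = [] then "none"
  else
    let severities := errors.map (fun e => PySem.Dict.getD (PySem.Dict.mk e) "severity" "medium")
    if "critical" ∈ severities then "critical"
    else if "high" ∈ severities then "high"
    else if "medium" ∈ severities then "medium"
    else "low"

-- ===== PORT B =====
def pvRankMap : PySem.Dict String Int := PySem.Dict.ofList [("critical", 3), ("high", 2), ("medium", 1)]

def pvNameMap : PySem.Dict Int String := PySem.Dict.ofList [((3 : Int), "critical"), (2, "high"), (1, "medium")]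

def assess_error_severity_py_alt (errors : List (List (String × String))) : String :=
  if errors = [] then "none"
  else
    let rank := errors.foldl
      (fun r e => max r (pvRankMap.getD (PySem.Dict.getD (PySem.Dict.mk e) "severity" "medium") 0)) 0
    pvNameMap.getD rank "low"

-- ===== PRECONDITION & SPEC =====
def Spec_assess_error_severity_py (errors : List (List (String × String))) (out : String) : Prop := out = assess_error_severity_py_alt errors
instance (errors : List (List (String × String))) (out : String) : Decidable (Spec_assess_error_severity_py errors out) := by unfold Spec_assess_error_severity_py; infer_instance

-- ===== CLAIM (what is proved, stated in full; the proofs are below) =====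
def Claim_equal_assess_error_severity_py : Prop := ∀ (errors : List (List (String × String))), Dom_assess_error_severity_py errors → Spec_assess_error_severity_py errors (assess_error_severity_py errors)

-- ===== LEMMAS AND PROOFS =====

def pvRank (s : String) : Int := pvRankMap.getD s 0

theorem pvRank_eq (s : String) :
    pvRank s = if s = "critical" then 3 else if s = "high" then 2 else if s = "medium" then 1 else 0 := by
  by_cases h1 : s = "critical"
  · subst h1; decide
  by_cases h2 : s = "high"
  · subst h2; decide
  by_cases h3 : s = "medium"
  · subst h3; decide
  simp only [h1, h2, h3, if_false]
  apply PySem.Dict.getD_of_not_contains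
  rw [show pvRankMap = PySem.Dict.mk [("critical", 3), ("high", 2), ("medium", 1)] from by decide]
  simp only [PySem.Dict.contains_mk]
  simp only [List.any_cons, List.any_nil, Bool.or_eq_false_iff, beq_eq_false_iff_ne, ne_eq]
  exact ⟨fun h => h1 h.symm, fun h => h2 h.symm, fun h => h3 h.symm, trivial⟩

def pvMaxRank (l : List String) : Int := l.foldr (fun s m => max (pvRank s) m) 0

theorem pvMaxRank_nonneg (l : List String) : 0 ≤ pvMaxRank l := by
  induction l with
  | nil => simp [pvMaxRank]
  | cons s t ih => simp [pvMaxRank] at ih ⊢; omega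

theorem pvRank_le (s : String) : pvRank s ≤ 3 := by
  rw [pvRank_eq]; split_ifs <;> omega

theorem pvRank_eq_three_iff (s : String) : pvRank s = 3 ↔ s = "critical" := by
  rw [pvRank_eq]; split_ifs <;> simp_all

theorem pvRank_ge_two_iff (s : String) : 2 ≤ pvRank s ↔ s = "critical" ∨ s = "high" := by
  rw [pvRank_eq]; split_ifs <;> simp_all

theorem pvRank_ge_one_iff (s : String) : 1 ≤ pvRank s ↔ s = "critical" ∨ s = "high" ∨ s = "medium" := by
  rw [pvRank_eq]; split_ifs <;> simp_all

theorem pvMaxRank_le (l : List String) : pvMaxRank l ≤ 3 := by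
  induction l with
  | nil => simp [pvMaxRank]
  | cons s t ih =>
    have := pvRank_le s
    simp [pvMaxRank] at ih ⊢; omega

theorem pvMaxRank_eq_three_iff (l : List String) : pvMaxRank l = 3 ↔ "critical" ∈ l := by
  induction l with
  | nil => simp [pvMaxRank]
  | cons s t ih =>
    have hs := pvRank_le s
    have ht := pvMaxRank_le t
    simp only [pvMaxRank, List.foldr_cons, List.mem_cons] at *
    constructor
    · intro h
      rcases max_cases (pvRank s) (List.foldr (fun s m => max (pvRank s) m) 0 t) with ⟨he, _⟩ | ⟨he, _⟩
      · left; exact ((pvRank_eq_three_iff s).mp (he ▸ h)).symm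
      · right; exact ih.mp (he ▸ h)
    · rintro (h | h)
      · have := (pvRank_eq_three_iff s).mpr h.symm; omega
      · have := ih.mpr h; omega

theorem pvMaxRank_ge_two_iff (l : List String) : 2 ≤ pvMaxRank l ↔ "critical" ∈ l ∨ "high" ∈ l := by
  induction l with
  | nil => simp [pvMaxRank]
  | cons s t ih =>
    have hiff := pvRank_ge_two_iff s
    simp only [pvMaxRank, List.foldr_cons, List.mem_cons] at *
    constructor
    · intro h
      rcases le_max_iff.mp h with h2 | h2
      · rcases hiff.mp h2 with h3 | h3
        · left; left; exact h3.symm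
        · right; left; exact h3.symm
      · rcases ih.mp h2 with h3 | h3
        · left; right; exact h3
        · right; right; exact h3
    · rintro (h | h) <;> rcases h with h | h
      · have := hiff.mpr (Or.inl h.symm); omega
      · have := ih.mpr (Or.inl h); omega
      · have := hiff.mpr (Or.inr h.symm); omega
      · have := ih.mpr (Or.inr h); omega

theorem pvMaxRank_ge_one_iff (l : List String) :
    1 ≤ pvMaxRank l ↔ "critical" ∈ l ∨ "high" ∈ l ∨ "medium" ∈ l := by
  induction l with
  | nil => simp [pvMaxRank]
  | cons s t ih =>
    have hiff := pvRank_ge_one_iff s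
    simp only [pvMaxRank, List.foldr_cons, List.mem_cons] at *
    constructor
    · intro h
      rcases le_max_iff.mp h with h2 | h2
      · rcases hiff.mp h2 with h3 | h3 | h3
        · exact Or.inl (Or.inl h3.symm)
        · exact Or.inr (Or.inl (Or.inl h3.symm))
        · exact Or.inr (Or.inr (Or.inl h3.symm))
      · rcases ih.mp h2 with h3 | h3 | h3
        · exact Or.inl (Or.inr h3)
        · exact Or.inr (Or.inl (Or.inr h3))
        · exact Or.inr (Or.inr (Or.inr h3))
    · rintro (h | h | h) <;> rcases h with h | h
      · have := hiff.mpr (Or.inl h.symm); omega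
      · have := ih.mpr (Or.inl h); omega
      · have := hiff.mpr (Or.inr (Or.inl h.symm)); omega
      · have := ih.mpr (Or.inr (Or.inl h)); omega
      · have := hiff.mpr (Or.inr (Or.inr h.symm)); omega
      · have := ih.mpr (Or.inr (Or.inr h)); omega

theorem pvFoldl_eq_max (l : List String) (a : Int) (ha : 0 ≤ a) :
    l.foldl (fun r s => max r (pvRank s)) a = max a (pvMaxRank l) := by
  induction l generalizing a with
  | nil => simp [pvMaxRank]; omega
  | cons s t ih =>
    have h1 := pvRank_le s
    have h0 : (0 : Int) ≤ 0 := le_refl 0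
    simp only [pvMaxRank, List.foldr_cons, List.foldl_cons] at *
    rw [ih (max a (pvRank s)) (by have := pvRank_eq s; omega)]
    omega

theorem pvName_vals : pvNameMap.getD 3 "low" = "critical" ∧ pvNameMap.getD 2 "low" = "high" ∧
    pvNameMap.getD 1 "low" = "medium" ∧ pvNameMap.getD 0 "low" = "low" := by decide

-- ===== VERDICT (by name: the statement is the Claim_ definition above) =====
theorem assess_error_severity_py_spec : Claim_equal_assess_error_severity_py := by
  intro errors _
  unfold Spec_assess_error_severity_py assess_error_severity_py assess_error_severity_py_alt
  by_cases he : errors = []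
  · simp [he]
  · simp only [he, if_false]
    set l := errors.map (fun e => PySem.Dict.getD (PySem.Dict.mk e) "severity" "medium") with hl
    have hfold : errors.foldl
        (fun r e => max r (pvRankMap.getD (PySem.Dict.getD (PySem.Dict.mk e) "severity" "medium") 0)) 0
        = pvMaxRank l := by
      have h1 : l.foldl (fun r s => max r (pvRank s)) 0 = max 0 (pvMaxRank l) :=
        pvFoldl_eq_max l 0 le_rfl
      rw [hl, List.foldl_map] at h1
      simp only [pvRank] at h1
      rw [h1, ← hl]
      have := pvMaxRank_nonneg l
      omega
    rw [hfold]
    have h3 := pvMaxRank_eq_three_iff l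
    have h2 := pvMaxRank_ge_two_iff l
    have h1 := pvMaxRank_ge_one_iff l
    have hle := pvMaxRank_le l
    have hge := pvMaxRank_nonneg l
    obtain ⟨n3, n2, n1, n0⟩ := pvName_vals
    by_cases hc : "critical" ∈ l
    · have : pvMaxRank l = 3 := h3.mpr hc
      simp [hc, this, n3]
    · by_cases hh : "high" ∈ l
      · have : pvMaxRank l = 2 := by
          have := h2.mpr (Or.inr hh)
          have : ¬ pvMaxRank l = 3 := fun h => hc (h3.mp h)
          omega
        simp [hc, hh, this, n2]
      · by_cases hm : "medium" ∈ l
        · have : pvMaxRank l = 1 := by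
            have := h1.mpr (Or.inr (Or.inr hm))
            have hn2 : ¬ 2 ≤ pvMaxRank l := fun h => by rcases h2.mp h with h | h <;> [exact hc h; exact hh h]
            omega
          simp [hc, hh, hm, this, n1]
        · have : pvMaxRank l = 0 := by
            have hn1 : ¬ 1 ≤ pvMaxRank l := fun h => by
              rcases h1.mp h with h | h | h <;> [exact hc h; exact hh h; exact hm h]
            omega
          simp [hc, hh, hm, this, n0]
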